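-- pv_equiv track=rewrite | github.com/Haripriya-p1702/ai-gitops-agent-v2 | backend/parsers/file_parser.py | _dockerfile_hints
-- ===== SOURCE A (Python) =====
-- def _dockerfile_hints(content: str) -> list[str]:
--     hints = []
--     lines = content.splitlines()
--     from_lines = [l for l in lines if l.strip().upper().startswith("FROM")]
--     for fl in from_lines:
--         if ":latest" in fl or (len(fl.split()) >= 2 and ":" not in fl.split()[1]):
--             hints.append(f"Dockerfile uses ':latest' base image: `{fl.strip()}`")
--     if not any("USER" in l.upper() for l in lines):
--         hints.append("Dockerfile does not set a non-root USER — runs as root by default.")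
--     if not any("HEALTHCHECK" in l.upper() for l in lines):
--         hints.append("Dockerfile has no HEALTHCHECK instruction.")
--     # ADD vs COPY
--     if any(l.strip().upper().startswith("ADD ") for l in lines):
--         hints.append("Use COPY instead of ADD unless you need URL fetch or tar extraction.")
--     return hints
-- ===== SOURCE B (Python) =====
-- def _dockerfile_hints(content: str) -> list[str]:
--     from_hints = []
--     has_user = has_healthcheck = has_add = False
--     for line in content.splitlines():
--         upper = line.upper()
--         stripped = line.strip()
--         if stripped.upper().startswith("FROM"):
--             parts = line.split()
--             if ":latest" in line or (len(parts) >= 2 and ":" not in parts[1]):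
--                 from_hints.append(f"Dockerfile uses ':latest' base image: `{stripped}`")
--         has_user = has_user or "USER" in upper
--         has_healthcheck = has_healthcheck or "HEALTHCHECK" in upper
--         has_add = has_add or stripped.upper().startswith("ADD ")
--     tail = []
--     if not has_user:
--         tail.append("Dockerfile does not set a non-root USER — runs as root by default.")
--     if not has_healthcheck:
--         tail.append("Dockerfile has no HEALTHCHECK instruction.")
--     if has_add:
--         tail.append("Use COPY instead of ADD unless you need URL fetch or tar extraction.")
--     return from_hints + tail
-- ===== Notes on version B (the rewrite author's own statement) =====
-- stated objective: simpler
-- what changed: A's five separate scans over the lines (a filter plus a loop for FROM hints, three any() scans) are merged into one pass that accumulates the FROM hints and three boolean flags, with the three trailing hints appended after the loop.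
import Mathlib
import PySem

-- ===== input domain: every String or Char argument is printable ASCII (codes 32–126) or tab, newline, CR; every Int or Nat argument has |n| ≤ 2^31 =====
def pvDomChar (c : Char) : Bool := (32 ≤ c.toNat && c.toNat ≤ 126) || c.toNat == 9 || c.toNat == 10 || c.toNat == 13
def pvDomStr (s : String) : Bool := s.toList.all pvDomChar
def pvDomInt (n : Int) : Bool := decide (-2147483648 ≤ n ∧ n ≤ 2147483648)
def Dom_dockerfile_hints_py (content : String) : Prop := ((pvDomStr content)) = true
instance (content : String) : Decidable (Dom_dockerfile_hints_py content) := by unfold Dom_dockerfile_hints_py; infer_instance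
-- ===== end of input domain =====

-- B is a single pass over the lines maintaining the FROM hints and three flags,
-- replacing A's five separate scans; objective: simpler (one traversal), same output.

-- ===== PORT A =====
def dockerfile_hints_py (content : String) : List String :=
  let lines := PySem.Str.splitlines content
  let from_lines := lines.filter
    (fun l => PySem.Str.startswith (PySem.Str.upper (PySem.Str.strip l)) "FROM")
  let hints := from_lines.foldl (fun hints fl =>
    if PySem.Str.isIn ":latest" fl ||
       (decide (2 ≤ (PySem.Str.split₀ fl).length) &&
        !(PySem.Str.isIn ":" ((PySem.Str.split₀ fl).getD 1 ""))) then
      hints ++ ["Dockerfile uses ':latest' base image: `" ++ PySem.Str.strip fl ++ "`"]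
    else hints) []
  let hints := if !(lines.any (fun l => PySem.Str.isIn "USER" (PySem.Str.upper l))) then
      hints ++ ["Dockerfile does not set a non-root USER — runs as root by default."]
    else hints
  let hints := if !(lines.any (fun l => PySem.Str.isIn "HEALTHCHECK" (PySem.Str.upper l))) then
      hints ++ ["Dockerfile has no HEALTHCHECK instruction."]
    else hints
  let hints := if lines.any (fun l => PySem.Str.startswith (PySem.Str.upper (PySem.Str.strip l)) "ADD ") then
      hints ++ ["Use COPY instead of ADD unless you need URL fetch or tar extraction."]
    else hints
  hints

-- ===== PORT B =====
def dockerfile_hints_py_alt (content : String) : List String :=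
  let st := (PySem.Str.splitlines content).foldl
    (fun (st : List String × Bool × Bool × Bool) line =>
      let upper := PySem.Str.upper line
      let stripped := PySem.Str.strip line
      let fh :=
        if PySem.Str.startswith (PySem.Str.upper stripped) "FROM" &&
           (PySem.Str.isIn ":latest" line ||
            (decide (2 ≤ (PySem.Str.split₀ line).length) &&
             !(PySem.Str.isIn ":" ((PySem.Str.split₀ line).getD 1 "")))) then
          st.1 ++ ["Dockerfile uses ':latest' base image: `" ++ stripped ++ "`"]
        else st.1
      (fh, st.2.1 || PySem.Str.isIn "USER" upper,
           st.2.2.1 || PySem.Str.isIn "HEALTHCHECK" upper,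
           st.2.2.2 || PySem.Str.startswith (PySem.Str.upper stripped) "ADD "))
    ([], false, false, false)
  st.1 ++
    (if !st.2.1 then ["Dockerfile does not set a non-root USER — runs as root by default."] else []) ++
    (if !st.2.2.1 then ["Dockerfile has no HEALTHCHECK instruction."] else []) ++
    (if st.2.2.2 then ["Use COPY instead of ADD unless you need URL fetch or tar extraction."] else [])

-- ===== PRECONDITION & SPEC =====
def Spec_dockerfile_hints_py (content : String) (out : List String) : Prop := out = dockerfile_hints_py_alt content
instance (content : String) (out : List String) : Decidable (Spec_dockerfile_hints_py content out) := by unfold Spec_dockerfile_hints_py; infer_instance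

-- ===== CLAIM (what is proved, stated in full; the proofs are below) =====
def Claim_equal_dockerfile_hints_py : Prop := ∀ (content : String), Dom_dockerfile_hints_py content → Spec_dockerfile_hints_py content (dockerfile_hints_py content)

-- ===== LEMMAS AND PROOFS =====

-- predicate and per-line hint abbreviations used only by the proofs
def pvIsFrom (l : String) : Bool :=
  PySem.Str.startswith (PySem.Str.upper (PySem.Str.strip l)) "FROM"
def pvFromCond (l : String) : Bool :=
  PySem.Str.isIn ":latest" l ||
  (decide (2 ≤ (PySem.Str.split₀ l).length) &&
   !(PySem.Str.isIn ":" ((PySem.Str.split₀ l).getD 1 "")))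
def pvFromMsg (l : String) : String :=
  "Dockerfile uses ':latest' base image: `" ++ PySem.Str.strip l ++ "`"
def pvIsAdd (l : String) : Bool :=
  PySem.Str.startswith (PySem.Str.upper (PySem.Str.strip l)) "ADD "

-- A's filter-then-fold over the FROM lines equals one fold over all lines with the guard conjoined
theorem pv_filter_fold (lines : List String) (acc : List String) :
    (lines.filter (fun l => pvIsFrom l)).foldl
      (fun h fl => if pvFromCond fl then h ++ [pvFromMsg fl] else h) acc
    = lines.foldl
      (fun h l => if pvIsFrom l && pvFromCond l then h ++ [pvFromMsg l] else h) acc := by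
  induction lines generalizing acc with
  | nil => simp only [List.filter_nil, List.foldl_nil]
  | cons x xs ih =>
    simp only [List.filter_cons, List.foldl_cons]
    cases hx : pvIsFrom x with
    | true =>
      simp only [if_true, List.foldl_cons, Bool.true_and]
      exact ih _
    | false =>
      simp only [Bool.false_eq_true, if_false, Bool.false_and]
      exact ih _

-- B's combined fold splits into the FROM fold and the three `any` scans
theorem pv_fold_split (lines : List String)
    (acc : List String) (b1 b2 b3 : Bool) :
    lines.foldl
      (fun (st : List String × Bool × Bool × Bool) line =>
        (if pvIsFrom line && pvFromCond line then st.1 ++ [pvFromMsg line] else st.1,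
         st.2.1 || PySem.Str.isIn "USER" (PySem.Str.upper line),
         st.2.2.1 || PySem.Str.isIn "HEALTHCHECK" (PySem.Str.upper line),
         st.2.2.2 || pvIsAdd line))
      (acc, b1, b2, b3)
    = (lines.foldl (fun h l => if pvIsFrom l && pvFromCond l then h ++ [pvFromMsg l] else h) acc,
       b1 || lines.any (fun l => PySem.Str.isIn "USER" (PySem.Str.upper l)),
       b2 || lines.any (fun l => PySem.Str.isIn "HEALTHCHECK" (PySem.Str.upper l)),
       b3 || lines.any (fun l => pvIsAdd l)) := by
  induction lines generalizing acc b1 b2 b3 with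
  | nil => simp
  | cons x xs ih =>
    simp only [List.foldl_cons]
    rw [ih]
    simp only [List.any_cons, Bool.or_assoc]

-- ===== VERDICT (by name: the statement is the Claim_ definition above) =====
theorem dockerfile_hints_py_spec : Claim_equal_dockerfile_hints_py := by
  intro content _
  show dockerfile_hints_py content = dockerfile_hints_py_alt content
  unfold dockerfile_hints_py dockerfile_hints_py_alt
  have hs := pv_fold_split (PySem.Str.splitlines content) [] false false false
  have hf := pv_filter_fold (PySem.Str.splitlines content) []
  simp only [pvIsFrom, pvFromCond, pvFromMsg, pvIsAdd] at hs hf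
  dsimp only
  rw [hs, ← hf]
  simp only [Bool.false_or]
  split_ifs <;> simp_all
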